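-- pv_equiv track=rewrite | github.com/mnm-matin/ml-project | customer_support_chatbot.py | create_bag_of_words
-- ===== SOURCE A (Python) =====
-- import string
--
-- def create_bag_of_words(tokens):
--     bag = {}
--     for token in tokens:
--         if token in string.punctuation:
--             continue
--         if token in bag:
--             bag[token] += 1
--         else:
--             bag[token] = 1
--     return bag
-- ===== SOURCE B (Python) =====
-- import string
--
-- def _merge(lb, rb):
--     # add rb's counts into lb's entries, then append rb's tokens unseen in lb
--     merged = {t: c + rb.get(t, 0) for t, c in lb.items()}
--     new = {t: c for t, c in rb.items() if t not in lb}
--     return {**merged, **new}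
--
-- def _bag(kept):
--     if len(kept) <= 1:
--         return {t: 1 for t in kept}
--     mid = len(kept) // 2
--     return _merge(_bag(kept[:mid]), _bag(kept[mid:]))
--
-- def create_bag_of_words(tokens):
--     return _bag([t for t in tokens if t not in string.punctuation])
-- ===== Notes on version B (the rewrite author's own statement) =====
-- stated objective: alternative
-- what changed: Replaces the single-pass incremental dict-counter loop by a divide-and-conquer: filter out punctuation, split the kept list in half, recursively build each half's bag and merge the two bags (adding shared counts, appending the right half's new tokens).
import Mathlib
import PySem

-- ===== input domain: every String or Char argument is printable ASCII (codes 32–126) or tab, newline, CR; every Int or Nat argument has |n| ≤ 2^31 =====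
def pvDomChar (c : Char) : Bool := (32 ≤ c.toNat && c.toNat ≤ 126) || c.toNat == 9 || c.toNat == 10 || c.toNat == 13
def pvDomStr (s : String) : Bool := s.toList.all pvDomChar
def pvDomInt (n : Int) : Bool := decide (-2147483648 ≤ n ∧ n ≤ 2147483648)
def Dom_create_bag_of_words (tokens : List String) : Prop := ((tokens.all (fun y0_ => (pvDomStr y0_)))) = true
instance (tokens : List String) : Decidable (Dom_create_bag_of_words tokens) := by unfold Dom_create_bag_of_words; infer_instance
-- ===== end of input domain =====

-- B replaces A's single-pass dict-counter loop by a divide-and-conquer: filter, split in half,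
-- recursively build each half's bag and merge the two bags (alternative decomposition, same return value).

-- string.punctuation
def pvPunct : String := "!\"#$%&'()*+,-./:;<=>?@[\\]^_`{|}~"

-- ===== PORT A =====
def create_bag_of_words (tokens : List String) : List (String × Int) :=
  (tokens.foldl (fun bag token =>
    if PySem.Str.isIn token pvPunct then bag
    else if bag.contains token then bag.modify token 0 (· + 1)
    else bag.insert token 1) (PySem.Dict.empty : PySem.Dict String Int)).items

-- ===== PORT B =====
-- rb.get(t, 0) on the assoc list rb (first match, default 0)
def pvLook (rb : List (String × Int)) (t : String) : Int :=
  match rb.find? (fun p => p.1 == t) with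
  | some p => p.2
  | none => 0

-- _merge: lb's entries with rb's counts added, then rb's entries whose key is not in lb.
-- (Dicts are assoc lists with distinct keys; the comprehensions over .items are maps/filters.)
def pvMerge (lb rb : List (String × Int)) : List (String × Int) :=
  lb.map (fun p => (p.1, p.2 + pvLook rb p.1))
    ++ rb.filter (fun p => !(lb.map Prod.fst).contains p.1)

-- _bag: kept[:mid] / kept[mid:] are List.take / List.drop (nonnegative in-range slice)
def pvBag (kept : List String) : List (String × Int) :=
  if kept.length ≤ 1 then kept.map (fun t => (t, 1))
  else  -- mid = len(kept) // 2
    pvMerge (pvBag (kept.take (kept.length / 2))) (pvBag (kept.drop (kept.length / 2)))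
termination_by kept.length
decreasing_by
  · simp only [List.length_take]; omega
  · simp only [List.length_drop]; omega

def create_bag_of_words_alt (tokens : List String) : List (String × Int) :=
  pvBag (tokens.filter (fun t => !(PySem.Str.isIn t pvPunct)))

-- ===== PRECONDITION & SPEC =====
def Spec_create_bag_of_words (tokens : List String) (out : List (String × Int)) : Prop := out = create_bag_of_words_alt tokens
instance (tokens : List String) (out : List (String × Int)) : Decidable (Spec_create_bag_of_words tokens out) := by unfold Spec_create_bag_of_words; infer_instance

-- ===== CLAIM (what is proved, stated in full; the proofs are below) =====
def Claim_equal_create_bag_of_words : Prop := ∀ (tokens : List String), Dom_create_bag_of_words tokens → Spec_create_bag_of_words tokens (create_bag_of_words tokens)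

-- ===== LEMMAS AND PROOFS =====

-- the common characterisation both ports are reduced to: distinct tokens in first-occurrence order, each with its count
def pvSpecBag (xs : List String) : List (String × Int) :=
  (PySem.Set.ofList xs).map (fun t => (t, (xs.count t : Int)))

-- A's per-token step (after the punctuation test) is exactly Counter's step.
theorem step_eq_counter_step (bag : PySem.Dict String Int) (t : String) :
    (if bag.contains t then bag.modify t 0 (· + 1) else bag.insert t 1) = bag.modify t 0 (· + 1) := by
  by_cases h : bag.contains t = true
  · simp [h]
  · simp only [Bool.not_eq_true] at h
    simp [h, PySem.Dict.modify, PySem.Dict.getD_of_not_contains _ _ h]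

-- A's fold over all tokens equals Counter of the filtered list, so A's result is pvSpecBag.
theorem portA_eq_spec (tokens : List String) :
    create_bag_of_words tokens = pvSpecBag (tokens.filter (fun t => !(PySem.Str.isIn t pvPunct))) := by
  unfold create_bag_of_words pvSpecBag
  have h : tokens.foldl (fun bag token =>
      if PySem.Str.isIn token pvPunct then bag
      else if bag.contains token then bag.modify token 0 (· + 1)
      else bag.insert token 1) (PySem.Dict.empty : PySem.Dict String Int)
      = PySem.Dict.counter (tokens.filter (fun t => !(PySem.Str.isIn t pvPunct))) := by
    rw [PySem.Dict.counter_eq_foldl, List.foldl_filter]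
    congr 1
    funext bag t
    by_cases h : PySem.Str.isIn t pvPunct = true
    all_goals simp only [Bool.not_eq_true, PySem.Str.isIn_eq] at h
    · simp [h]
    · simp [h, step_eq_counter_step]
  rw [h, PySem.Dict.items_counter]

-- looking a token up in a spec bag returns its count (0 when absent)
theorem find?_beq_self (l : List String) (t : String) (hm : t ∈ l) :
    l.find? (fun a => a == t) = some t := by
  induction l with
  | nil => cases hm
  | cons a l ih =>
    by_cases ha : a = t
    · simp [List.find?, ha]
    · have h1 : t ∈ l := by cases hm with
        | head => exact absurd rfl ha
        | tail _ h => exact h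
      have h2 : (a == t) = false := by simp [ha]
      simp [List.find?, h2, ih h1]

theorem pvLook_spec (ys : List String) (t : String) :
    pvLook (pvSpecBag ys) t = ys.count t := by
  unfold pvLook pvSpecBag
  rw [List.find?_map]
  by_cases hm : t ∈ ys
  · rw [show ((fun p : String × Int => p.1 == t) ∘ (fun t => (t, (ys.count t : Int)))) = (fun a => a == t) from rfl,
      find?_beq_self _ t ((PySem.Set.mem_ofList ys t).mpr hm)]
    rfl
  · rw [List.find?_eq_none.mpr ?_]
    · simp [List.count_eq_zero_of_not_mem hm]
    · intro a ha
      simp only [Function.comp, beq_iff_eq]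
      intro h
      exact hm ((PySem.Set.mem_ofList ys a).mp ha |> (h ▸ ·))

-- keys of a spec bag are the distinct tokens
theorem specBag_keys (xs : List String) :
    (pvSpecBag xs).map Prod.fst = PySem.Set.ofList xs := by
  unfold pvSpecBag
  rw [List.map_map]
  exact List.map_id _

-- merging the spec bags of two lists yields the spec bag of their concatenation
theorem merge_spec (xs ys : List String) :
    pvMerge (pvSpecBag xs) (pvSpecBag ys) = pvSpecBag (xs ++ ys) := by
  unfold pvMerge
  rw [specBag_keys]
  conv_rhs => rw [pvSpecBag, PySem.Set.ofList_append, PySem.Set.update_eq_append_filter, List.map_append]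
  congr 1
  · unfold pvSpecBag
    rw [List.map_map]
    apply List.map_congr_left
    intro t _
    have hl := pvLook_spec ys t
    unfold pvSpecBag at hl
    simp only [Function.comp_apply, hl, List.count_append]
    push_cast
    ring_nf
  · unfold pvSpecBag
    rw [List.filter_map]
    apply List.map_congr_left
    intro t ht
    have hcond := List.of_mem_filter ht
    have htx : t ∉ xs := by
      simp only [Function.comp_apply, Bool.not_eq_true'] at hcond
      have hnc : t ∉ PySem.Set.ofList xs := by simpa using hcond
      exact fun hmem => hnc ((PySem.Set.mem_ofList xs t).mpr hmem)
    rw [List.count_append, List.count_eq_zero_of_not_mem htx]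
    simp

-- divide and conquer computes the spec bag
theorem pvBag_spec (xs : List String) : pvBag xs = pvSpecBag xs := by
  rw [pvBag]
  by_cases h : xs.length ≤ 1
  · rw [if_pos h]
    match xs, h with
    | [], _ => rfl
    | [t], _ => simp [pvSpecBag, PySem.Set.ofList]
  · rw [if_neg h, pvBag_spec (xs.take (xs.length / 2)), pvBag_spec (xs.drop (xs.length / 2)),
      merge_spec, List.take_append_drop]
termination_by xs.length
decreasing_by
  · simp only [List.length_take]; omega
  · simp only [List.length_drop]; omega

-- ===== VERDICT (by name: the statement is the Claim_ definition above) =====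
theorem create_bag_of_words_spec : Claim_equal_create_bag_of_words := by
  intro tokens _
  unfold Spec_create_bag_of_words create_bag_of_words_alt
  rw [portA_eq_spec, pvBag_spec]
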